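-- pv_equiv track=rewrite | github.com/seanabrazier-sketch/edai_accounting_modules | src/util/necessary.py | v_lookup_2
-- ===== SOURCE A (Python) =====
-- def v_lookup_2(value,matching_array,return_array):
--
--     try:
--         variance_array=[(i-value)**2 for i in matching_array]
--         min_val=min(variance_array)
--         index=variance_array.index(min_val)
--         return_value=return_array[index]
--         return return_value
--     except:
--         return 0
-- ===== SOURCE B (Python) =====
-- def v_lookup_2(value, matching_array, return_array):
--     best_index = None
--     best_dist = None
--     for i, x in enumerate(matching_array):
--         dist = (x - value) ** 2
--         if best_dist is None or dist < best_dist: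
--             best_index = i
--             best_dist = dist
--     if best_index is None:
--         return 0
--     if best_index < len(return_array):
--         return return_array[best_index]
--     return 0
-- ===== Notes on version B (the rewrite author's own statement) =====
-- stated objective: simpler
-- what changed: Replaced the three-pass pipeline (build squared-distance list, min(), .index(), subscript inside a bare try/except) by a single fused argmin loop tracking best index/distance with strict-less updates, plus explicit empty/out-of-range checks instead of exception handling.
import Mathlib
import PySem

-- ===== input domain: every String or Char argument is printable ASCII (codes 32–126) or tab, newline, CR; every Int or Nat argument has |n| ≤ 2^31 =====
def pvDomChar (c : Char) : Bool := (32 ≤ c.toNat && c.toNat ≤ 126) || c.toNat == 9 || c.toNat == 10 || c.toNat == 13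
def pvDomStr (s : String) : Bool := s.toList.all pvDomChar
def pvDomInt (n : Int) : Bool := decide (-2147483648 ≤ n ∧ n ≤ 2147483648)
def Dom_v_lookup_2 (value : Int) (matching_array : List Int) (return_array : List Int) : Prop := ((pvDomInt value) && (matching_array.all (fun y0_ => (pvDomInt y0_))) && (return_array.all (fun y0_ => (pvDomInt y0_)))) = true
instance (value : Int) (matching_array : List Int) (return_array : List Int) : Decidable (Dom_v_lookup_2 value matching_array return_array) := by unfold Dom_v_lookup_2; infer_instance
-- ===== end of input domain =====

-- B fuses A's build-list/min/.index/subscript pipeline into one argmin loop with explicit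
-- empty/out-of-range checks instead of a bare try/except; same return value, simpler shape.


-- ===== PORT A =====
-- A: variance_array = [(i-value)**2 for i in matching_array]; min; .index; return_array[index];
-- the bare except returns 0 when min() fails (empty list) or the subscript is out of range.
def v_lookup_2 (value : Int) (matching_array : List Int) (return_array : List Int) : Int :=
  let variance_array := matching_array.map (fun i => (i - value) ^ 2)
  match PySem.List.min? variance_array (fun y => y) with
  | none => 0
  | some min_val =>
    match PySem.List.index? variance_array min_val with
    | none => 0
    | some index =>
      match PySem.List.pyGet? return_array (index : Int) with
      | none => 0
      | some return_value => return_value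

-- ===== PORT B =====
-- B: single fused argmin loop over (index, element), strict-less updates; then bounds-checked lookup.
def vAltGo (value : Int) : List Int → Nat → Option (Nat × Int) → Option (Nat × Int)
  | [], _, acc => acc
  | x :: xs, i, acc =>
      let dist := (x - value) ^ 2
      let acc' := match acc with
        | none => some (i, dist)
        | some (bi, bd) => if dist < bd then some (i, dist) else some (bi, bd)
      vAltGo value xs (i + 1) acc'

def v_lookup_2_alt (value : Int) (matching_array : List Int) (return_array : List Int) : Int :=
  match vAltGo value matching_array 0 none with
  | none => 0
  | some (best_index, _) =>
    if h : best_index < return_array.length then return_array[best_index] else 0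

-- ===== PRECONDITION & SPEC =====
def Spec_v_lookup_2 (value : Int) (matching_array : List Int) (return_array : List Int) (out : Int) : Prop := out = v_lookup_2_alt value matching_array return_array
instance (value : Int) (matching_array : List Int) (return_array : List Int) (out : Int) : Decidable (Spec_v_lookup_2 value matching_array return_array out) := by unfold Spec_v_lookup_2; infer_instance

-- ===== CLAIM (what is proved, stated in full; the proofs are below) =====
def Claim_equal_v_lookup_2 : Prop := ∀ (value : Int) (matching_array : List Int) (return_array : List Int), Dom_v_lookup_2 value matching_array return_array → Spec_v_lookup_2 value matching_array return_array (v_lookup_2 value matching_array return_array)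

-- ===== LEMMAS AND PROOFS =====

-- Proof-side recursion: result of continuing the argmin loop from best distance bd,
-- as (offset from current position, value) of the first strict improvement chain's end.
def vFind (v : Int) : List Int → Int → Option (Nat × Int)
  | [], _ => none
  | x :: xs, bd =>
    let d := (x - v) ^ 2
    if d < bd then
      match vFind v xs d with
      | none => some (0, d)
      | some (j, m) => some (j + 1, m)
    else
      match vFind v xs bd with
      | none => none
      | some (j, m) => some (j + 1, m)

theorem vAltGo_eq_vFind (v : Int) (xs : List Int) : ∀ (i bi : Nat) (bd : Int),
    vAltGo v xs i (some (bi, bd)) =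
      match vFind v xs bd with
      | none => some (bi, bd)
      | some (j, m) => some (i + j, m) := by
  induction xs with
  | nil => intro i bi bd; simp [vAltGo, vFind]
  | cons x xs ih =>
    intro i bi bd
    simp only [vAltGo, vFind]
    by_cases h : (x - v) ^ 2 < bd
    · simp only [h, if_true]
      rw [ih]
      cases hf : vFind v xs ((x - v) ^ 2) with
      | none => simp
      | some jm => obtain ⟨j, m⟩ := jm; simp; omega
    · simp only [if_neg h]
      rw [ih]
      cases hf : vFind v xs bd with
      | none => simp
      | some jm => obtain ⟨j, m⟩ := jm; simp; omega

theorem vFind_none (v : Int) (xs : List Int) : ∀ (bd : Int),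
    vFind v xs bd = none → ∀ x ∈ xs, bd ≤ (x - v) ^ 2 := by
  induction xs with
  | nil => simp
  | cons x xs ih =>
    intro bd h y hy
    simp only [vFind] at h
    by_cases hlt : (x - v) ^ 2 < bd
    · rw [if_pos hlt] at h
      cases hf : vFind v xs ((x - v) ^ 2) <;> simp [hf] at h
    · rw [if_neg hlt] at h
      cases hf : vFind v xs bd with
      | none =>
        rcases List.mem_cons.mp hy with rfl | hy'
        · omega
        · exact ih bd hf y hy'
      | some jm => obtain ⟨j, m⟩ := jm; simp [hf] at h

theorem vFind_some (v : Int) (xs : List Int) : ∀ (bd : Int) (j : Nat) (m : Int),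
    vFind v xs bd = some (j, m) →
      m < bd ∧ (∀ x ∈ xs, m ≤ (x - v) ^ 2) ∧
        PySem.List.index? (xs.map (fun x => (x - v) ^ 2)) m = some j := by
  induction xs with
  | nil => simp [vFind]
  | cons x xs ih =>
    intro bd j m h
    simp only [vFind] at h
    by_cases hlt : (x - v) ^ 2 < bd
    · rw [if_pos hlt] at h
      cases hf : vFind v xs ((x - v) ^ 2) with
      | none =>
        rw [hf] at h
        simp at h
        obtain ⟨rfl, rfl⟩ := h
        refine ⟨hlt, ?_, ?_⟩
        · intro y hy
          rcases List.mem_cons.mp hy with rfl | hy'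
          · exact le_refl _
          · exact vFind_none v xs _ hf y hy'
        · rw [List.map_cons]
          exact PySem.List.index?_cons_self _ _
      | some jm =>
        obtain ⟨j', m'⟩ := jm
        rw [hf] at h
        simp at h
        obtain ⟨rfl, rfl⟩ := h
        obtain ⟨h1, h2, h3⟩ := ih _ _ _ hf
        refine ⟨by omega, ?_, ?_⟩
        · intro y hy
          rcases List.mem_cons.mp hy with rfl | hy'
          · omega
          · exact h2 y hy'
        · rw [List.map_cons,
            PySem.List.index?_cons_of_ne (x := (x - v) ^ 2) (v := m') _ (by omega), h3]
          rfl
    · rw [if_neg hlt] at h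
      cases hf : vFind v xs bd with
      | none => rw [hf] at h; simp at h
      | some jm =>
        obtain ⟨j', m'⟩ := jm
        rw [hf] at h
        simp at h
        obtain ⟨rfl, rfl⟩ := h
        obtain ⟨h1, h2, h3⟩ := ih _ _ _ hf
        refine ⟨h1, ?_, ?_⟩
        · intro y hy
          rcases List.mem_cons.mp hy with rfl | hy'
          · omega
          · exact h2 y hy'
        · rw [List.map_cons,
            PySem.List.index?_cons_of_ne (x := (x - v) ^ 2) (v := m') _ (by omega), h3]
          rfl

theorem foldl_min_of_le (ds : List Int) : ∀ (d0 : Int), (∀ d ∈ ds, d0 ≤ d) → ds.foldl min d0 = d0 := by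
  induction ds with
  | nil => intro d0 _; rfl
  | cons d ds ih =>
    intro d0 h
    have h1 : d0 ≤ d := h d (List.mem_cons_self)
    have hmin : min d0 d = d0 := min_eq_left h1
    simp only [List.foldl_cons, hmin]
    exact ih d0 (fun y hy => h y (List.mem_cons_of_mem _ hy))

theorem foldl_min_of_mem (ds : List Int) : ∀ (d0 m : Int), m ∈ ds → (∀ d ∈ ds, m ≤ d) → m ≤ d0 →
    ds.foldl min d0 = m := by
  induction ds with
  | nil => simp
  | cons d ds ih =>
    intro d0 m hm hle hd0
    simp only [List.foldl_cons]
    rcases List.mem_cons.mp hm with rfl | hm'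
    · by_cases hmem : m ∈ ds
      · exact ih _ m hmem (fun y hy => hle y (List.mem_cons_of_mem _ hy))
          (le_min hd0 (le_refl m))
      · have hmin : min d0 m = m := min_eq_right hd0
        rw [hmin]
        exact foldl_min_of_le ds m (fun y hy => hle y (List.mem_cons_of_mem _ hy))
    · have hdm : m ≤ d := hle d List.mem_cons_self
      exact ih _ m hm' (fun y hy => hle y (List.mem_cons_of_mem _ hy)) (le_min hd0 hdm)

-- the final lookup step agrees
theorem lookup_step (ra : List Int) (k : Nat) :
    (match PySem.List.pyGet? ra (k : Int) with
      | none => 0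
      | some rv => rv) = if h : k < ra.length then ra[k] else 0 := by
  rw [PySem.List.pyGet?_natCast]
  by_cases h : k < ra.length
  · simp [h]
  · simp [h]

theorem v_lookup_2_main (value : Int) (matching_array return_array : List Int) :
    v_lookup_2 value matching_array return_array = v_lookup_2_alt value matching_array return_array := by
  cases matching_array with
  | nil => simp [v_lookup_2, v_lookup_2_alt, vAltGo, PySem.List.min?]
  | cons x xs =>
    have hB : vAltGo value (x :: xs) 0 none =
        match vFind value xs ((x - value) ^ 2) with
        | none => some (0, (x - value) ^ 2)
        | some jm => some (1 + jm.1, jm.2) := by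
      show vAltGo value xs 1 (some (0, (x - value) ^ 2)) = _
      rw [vAltGo_eq_vFind]
      cases vFind value xs ((x - value) ^ 2) with
      | none => rfl
      | some jm => rfl
    unfold v_lookup_2 v_lookup_2_alt
    rw [hB]
    simp only [List.map_cons, PySem.List.min?_id_cons]
    cases hfind : vFind value xs ((x - value) ^ 2) with
    | none =>
      have hle := vFind_none value xs _ hfind
      have hfold : List.foldl min ((x - value) ^ 2) (List.map (fun i => (i - value) ^ 2) xs)
          = (x - value) ^ 2 := by
        apply foldl_min_of_le
        intro d hd
        obtain ⟨y, hy, rfl⟩ := List.mem_map.mp hd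
        exact hle y hy
      rw [hfold]
      simp only [PySem.List.index?_cons_self]
      exact lookup_step return_array 0
    | some jm =>
      obtain ⟨j, m⟩ := jm
      obtain ⟨h1, h2, h3⟩ := vFind_some value xs ((x - value) ^ 2) j m hfind
      have hfold : List.foldl min ((x - value) ^ 2) (List.map (fun i => (i - value) ^ 2) xs) = m := by
        apply foldl_min_of_mem
        · have hmem : m ∈ List.map (fun i => (i - value) ^ 2) xs := by
            have := PySem.List.index?_isSome_iff
              (xs := List.map (fun x => (x - value) ^ 2) xs) (v := m)
            rw [h3] at this
            simpa using this.mp rfl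
          exact hmem
        · intro d hd
          obtain ⟨y, hy, rfl⟩ := List.mem_map.mp hd
          exact h2 y hy
        · omega
      rw [hfold]
      rw [PySem.List.index?_cons_of_ne (x := (x - value) ^ 2) (v := m) _ (by omega), h3]
      simp only [Option.map_some, Nat.one_add]
      exact lookup_step return_array (j + 1)

-- ===== VERDICT (by name: the statement is the Claim_ definition above) =====
theorem v_lookup_2_spec : Claim_equal_v_lookup_2 := by
  intro value matching_array return_array _
  unfold Spec_v_lookup_2
  exact v_lookup_2_main value matching_array return_array
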